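-- pv_equiv track=rewrite | github.com/one5469/KDT_python | project/my_2048_Beta_권혁원/func_file.py | checkMerge
-- ===== SOURCE A (Python) =====
-- def checkMerge(tiles):      # 더이상 움직일 구간이 있는지 확인
--     locations = tiles.keys()
--     for row, col in locations:
--         if (row-1, col) in locations and tiles[(row-1, col)] == tiles[row, col]:
--             return False
--         elif (row, col-1) in locations and tiles[(row, col-1)] == tiles[row, col]:
--             return False
--         elif (row+1, col) in locations and tiles[(row+1, col)] == tiles[row, col]:
--             return False
--         elif (row, col+1) in locations and tiles[(row, col+1)] == tiles[row, col]:
--             return False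
--
--     return True
-- ===== SOURCE B (Python) =====
-- def checkMerge(tiles):
--     items = set(tiles.items())
--     shifted = ({((r, c + 1), v) for (r, c), v in tiles.items()}
--                | {((r + 1, c), v) for (r, c), v in tiles.items()})
--     return items.isdisjoint(shifted)
-- ===== Notes on version B (the rewrite author's own statement) =====
-- stated objective: alternative
-- what changed: B uses a shift-and-intersect algorithm: it builds the item set, shifts the whole board right and down as two item sets, and returns whether the original set is disjoint from their union, instead of A's per-tile four-direction neighbour scan with early return.
import Mathlib
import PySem

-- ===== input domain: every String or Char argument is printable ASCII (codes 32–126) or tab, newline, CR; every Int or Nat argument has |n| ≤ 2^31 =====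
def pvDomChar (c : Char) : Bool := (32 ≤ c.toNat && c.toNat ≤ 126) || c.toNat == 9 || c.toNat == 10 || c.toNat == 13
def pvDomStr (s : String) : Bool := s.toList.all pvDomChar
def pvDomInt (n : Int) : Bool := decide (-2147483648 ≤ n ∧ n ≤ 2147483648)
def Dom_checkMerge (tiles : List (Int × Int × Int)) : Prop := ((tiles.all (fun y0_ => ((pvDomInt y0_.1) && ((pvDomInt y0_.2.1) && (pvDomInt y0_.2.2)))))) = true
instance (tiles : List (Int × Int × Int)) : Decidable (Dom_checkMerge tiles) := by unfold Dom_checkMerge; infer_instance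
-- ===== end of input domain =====

-- B replaces A's per-tile four-direction scan with early return by a shift-and-intersect
-- algorithm: build the item set, shift the whole board right and down, and test disjointness.
-- Objective: alternative (same boolean by adjacency symmetry).

-- ===== PORT A =====
-- the input dict, as in Python: keys (row, col), values the tile numbers
def pvDict (tiles : List (Int × Int × Int)) : PySem.Dict (Int × Int) Int :=
  PySem.Dict.ofList (tiles.map (fun y => ((y.1, y.2.1), y.2.2)))

-- the for-loop over `locations` with its elif chain and early returns
def checkMergeLoop (d : PySem.Dict (Int × Int) Int) : List (Int × Int) → Bool
  | [] => true
  | (row, col) :: rest =>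
    if d.contains (row - 1, col) && (d.get? (row - 1, col) == d.get? (row, col)) then false
    else if d.contains (row, col - 1) && (d.get? (row, col - 1) == d.get? (row, col)) then false
    else if d.contains (row + 1, col) && (d.get? (row + 1, col) == d.get? (row, col)) then false
    else if d.contains (row, col + 1) && (d.get? (row, col + 1) == d.get? (row, col)) then false
    else checkMergeLoop d rest

def checkMerge (tiles : List (Int × Int × Int)) : Bool :=
  let d := pvDict tiles
  checkMergeLoop d d.keys

-- ===== PORT B =====
-- items = set(tiles.items()); shifted = right-shifted items | down-shifted items;
-- return items.isdisjoint(shifted)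
def checkMerge_alt (tiles : List (Int × Int × Int)) : Bool :=
  let d := pvDict tiles
  let items : PySem.Set ((Int × Int) × Int) := PySem.Set.ofList d.items
  let shifted : PySem.Set ((Int × Int) × Int) :=
    PySem.Set.union
      (PySem.Set.ofList (d.items.map (fun p => ((p.1.1, p.1.2 + 1), p.2))))
      (PySem.Set.ofList (d.items.map (fun p => ((p.1.1 + 1, p.1.2), p.2))))
  PySem.Set.isdisjoint items shifted

-- ===== PRECONDITION & SPEC =====
def Spec_checkMerge (tiles : List (Int × Int × Int)) (out : Bool) : Prop := out = checkMerge_alt tiles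
instance (tiles : List (Int × Int × Int)) (out : Bool) : Decidable (Spec_checkMerge tiles out) := by unfold Spec_checkMerge; infer_instance

-- ===== CLAIM (what is proved, stated in full; the proofs are below) =====
def Claim_equal_checkMerge : Prop := ∀ (tiles : List (Int × Int × Int)), Dom_checkMerge tiles → Spec_checkMerge tiles (checkMerge tiles)

-- ===== LEMMAS AND PROOFS =====

-- A's per-key condition (the disjunction of the four elif tests)
def cond4 (d : PySem.Dict (Int × Int) Int) (rc : Int × Int) : Bool :=
  (d.contains (rc.1 - 1, rc.2) && (d.get? (rc.1 - 1, rc.2) == d.get? rc)) ||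
  (d.contains (rc.1, rc.2 - 1) && (d.get? (rc.1, rc.2 - 1) == d.get? rc)) ||
  (d.contains (rc.1 + 1, rc.2) && (d.get? (rc.1 + 1, rc.2) == d.get? rc)) ||
  (d.contains (rc.1, rc.2 + 1) && (d.get? (rc.1, rc.2 + 1) == d.get? rc))

-- an item whose right or down neighbour holds the same value
def cond2 (d : PySem.Dict (Int × Int) Int) (p : (Int × Int) × Int) : Bool :=
  (d.get? (p.1.1, p.1.2 + 1) == some p.2) || (d.get? (p.1.1 + 1, p.1.2) == some p.2)

theorem checkMergeLoop_eq_any (d : PySem.Dict (Int × Int) Int) (l : List (Int × Int)) :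
    checkMergeLoop d l = !(l.any (cond4 d)) := by
  induction l with
  | nil => rfl
  | cons rc rest ih =>
    obtain ⟨row, col⟩ := rc
    rw [checkMergeLoop]
    cases h1 : (d.contains (row - 1, col) && (d.get? (row - 1, col) == d.get? (row, col))) <;>
      cases h2 : (d.contains (row, col - 1) && (d.get? (row, col - 1) == d.get? (row, col))) <;>
        cases h3 : (d.contains (row + 1, col) && (d.get? (row + 1, col) == d.get? (row, col))) <;>
          cases h4 : (d.contains (row, col + 1) && (d.get? (row, col + 1) == d.get? (row, col))) <;>
            simp [cond4, h1, h2, h3, h4, ih]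

-- B's disjointness test fails exactly when some item has an equal right or down neighbour
theorem alt_eq_any (tiles : List (Int × Int × Int)) :
    checkMerge_alt tiles = !((pvDict tiles).items.any (cond2 (pvDict tiles))) := by
  set d := pvDict tiles with hd
  have hnd : d.keys.Nodup := PySem.Dict.nodup_keys_ofList _
  unfold checkMerge_alt
  rw [← hd]
  rcases h : d.items.any (cond2 d) with _ | _
  · -- no such item ⇒ disjoint
    simp only [Bool.not_false]
    rw [PySem.Set.isdisjoint_iff]
    rintro ⟨⟨r, c⟩, v⟩ hp hq
    rw [PySem.Set.mem_ofList] at hp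
    rw [PySem.Set.mem_union, PySem.Set.mem_ofList, PySem.Set.mem_ofList] at hq
    have hv : d.get? (r, c) = some v := PySem.Dict.get?_of_mem_items _ hp hnd
    simp only [List.any_eq_false] at h
    rcases hq with hq | hq <;>
    · rw [List.mem_map] at hq
      obtain ⟨q, hq', he⟩ := hq
      apply h q hq'
      obtain ⟨he1, he2⟩ := Prod.mk.injEq _ _ _ _ ▸ he
      simp only [cond2, Bool.or_eq_true, beq_iff_eq]
      first
      | exact Or.inl (by rw [← he1] at hv; rw [hv, he2])
      | exact Or.inr (by rw [← he1] at hv; rw [hv, he2])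
  · -- some item fires ⇒ not disjoint
    simp only [Bool.not_true]
    rw [Bool.eq_false_iff]
    intro ht
    rw [PySem.Set.isdisjoint_iff] at ht
    simp only [List.any_eq_true] at h
    obtain ⟨⟨⟨r, c⟩, v⟩, hp, hc⟩ := h
    simp only [cond2, Bool.or_eq_true, beq_iff_eq] at hc
    rcases hc with hc | hc
    · exact ht ((r, c + 1), v)
        (by rw [PySem.Set.mem_ofList]; exact PySem.Dict.mem_items_of_get?_eq_some _ hc)
        (by rw [PySem.Set.mem_union, PySem.Set.mem_ofList]
            exact Or.inl (List.mem_map.2 ⟨((r, c), v), hp, rfl⟩))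
    · exact ht ((r + 1, c), v)
        (by rw [PySem.Set.mem_ofList]; exact PySem.Dict.mem_items_of_get?_eq_some _ hc)
        (by rw [PySem.Set.mem_union, PySem.Set.mem_ofList, PySem.Set.mem_ofList]
            exact Or.inr (List.mem_map.2 ⟨((r, c), v), hp, rfl⟩))

-- adjacency symmetry: some key has an equal neighbour in one of four directions
-- iff some item has an equal right or down neighbour
theorem any_cond4_eq_any_cond2 (d : PySem.Dict (Int × Int) Int) (hnd : d.keys.Nodup) :
    d.keys.any (cond4 d) = d.items.any (cond2 d) := by
  rw [Bool.eq_iff_iff]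
  simp only [List.any_eq_true]
  constructor
  · rintro ⟨⟨r, c⟩, hk, hc⟩
    have hcont : d.contains (r, c) = true := (PySem.Dict.contains_iff_mem_keys _ _).2 hk
    rw [PySem.Dict.contains_eq_isSome_get?] at hcont
    obtain ⟨v, hv⟩ := Option.isSome_iff_exists.1 hcont
    simp only [cond4, Bool.or_eq_true, Bool.and_eq_true, beq_iff_eq] at hc
    rcases hc with ((h | h) | h) | h
    · obtain ⟨hc', he⟩ := h
      rw [PySem.Dict.contains_eq_isSome_get?] at hc'
      obtain ⟨v', hv'⟩ := Option.isSome_iff_exists.1 hc'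
      refine ⟨((r - 1, c), v'), PySem.Dict.mem_items_of_get?_eq_some _ hv', ?_⟩
      simp only [cond2, Bool.or_eq_true, beq_iff_eq]
      right
      rw [show r - 1 + 1 = r by ring, hv, ← hv', he, hv]
    · obtain ⟨hc', he⟩ := h
      rw [PySem.Dict.contains_eq_isSome_get?] at hc'
      obtain ⟨v', hv'⟩ := Option.isSome_iff_exists.1 hc'
      refine ⟨((r, c - 1), v'), PySem.Dict.mem_items_of_get?_eq_some _ hv', ?_⟩
      simp only [cond2, Bool.or_eq_true, beq_iff_eq]
      left
      rw [show c - 1 + 1 = c by ring, hv, ← hv', he, hv]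
    · obtain ⟨_, he⟩ := h
      refine ⟨((r, c), v), PySem.Dict.mem_items_of_get?_eq_some _ hv, ?_⟩
      simp only [cond2, Bool.or_eq_true, beq_iff_eq]
      right
      rw [he, hv]
    · obtain ⟨_, he⟩ := h
      refine ⟨((r, c), v), PySem.Dict.mem_items_of_get?_eq_some _ hv, ?_⟩
      simp only [cond2, Bool.or_eq_true, beq_iff_eq]
      left
      rw [he, hv]
  · rintro ⟨⟨⟨r, c⟩, v⟩, hp, hc⟩
    have hv : d.get? (r, c) = some v := PySem.Dict.get?_of_mem_items _ hp hnd
    refine ⟨(r, c), PySem.Dict.mem_keys_of_mem_items _ hp, ?_⟩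
    simp only [cond2, Bool.or_eq_true, beq_iff_eq] at hc
    simp only [cond4, Bool.or_eq_true, Bool.and_eq_true, beq_iff_eq]
    rcases hc with h | h
    · exact Or.inr ⟨by rw [PySem.Dict.contains_eq_isSome_get?, h]; rfl, by rw [h, hv]⟩
    · exact Or.inl (Or.inr ⟨by rw [PySem.Dict.contains_eq_isSome_get?, h]; rfl, by rw [h, hv]⟩)

-- ===== VERDICT (by name: the statement is the Claim_ definition above) =====
theorem checkMerge_spec : Claim_equal_checkMerge := by
  intro tiles _
  unfold Spec_checkMerge
  rw [alt_eq_any]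
  show checkMergeLoop (pvDict tiles) (pvDict tiles).keys = _
  have hnd : (pvDict tiles).keys.Nodup := by
    unfold pvDict; exact PySem.Dict.nodup_keys_ofList _
  rw [checkMergeLoop_eq_any, any_cond4_eq_any_cond2 _ hnd]
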